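-- pv_equiv track=rewrite | github.com/DataDog/datadog-agent | tasks/libs/testing/flakes.py | consolidate_flaky_failures
-- ===== SOURCE A (Python) =====
-- def consolidate_flaky_failures(flaky_failures: set, failing_tests: set) -> set:
--     """
--     Consolidate flaky failures.
--     Return a set with all the failures that are due to flakiness.
--     If a failing test has only children that are failing because of flakiness, the failing test should be considered flaky as well.
--     If a failing has two children failing because of flakiness and one child that is failing because of a real issue, the failing test should not be considered flaky.
--     """
--     new_flaky_failures = set(flaky_failures)
--     list_failing_tests = list(failing_tests)
--     list_failing_tests.sort(key=lambda x: len(x.split('/')), reverse=True)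
--     for test in list_failing_tests:
--         if test in flaky_failures:
--             continue
--         for flaky_failure in flaky_failures:
--             if is_strict_child(flaky_failure, test):
--                 new_flaky_failures.add(test)
--                 break
--         children = get_child_test_in_list(test, failing_tests)
--         if not children:  # If the test has no children it cannot be failed because of a flaky child
--             continue
--         has_non_flaky_failing_child = False
--         for child in children:
--             if child not in new_flaky_failures:
--                 has_non_flaky_failing_child = True
--         if not has_non_flaky_failing_child:
--             new_flaky_failures.add(test)
--
--     return new_flaky_failures
--
-- def get_child_test_in_list(test_name, test_list):
--     """Get the child test in a list of tests
--
--     Get the child test in a list of tests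
--     For example with the test "TestEKSSuite/TestCPU" and the list ["TestEKSSuite/TestCPU/TestCPUUtilization", "TestKindSuite/TestCPU", "TestEKSSuite/TestCPU"]
--     this method should return the test "TestEKSSuite/TestCPU/TestCPUUtilization"
--
--     Args:
--         test_name (str): Test name to get the child test from
--         test_list (list): List of test names to get the child test from
--
--     """
--     children = []
--     for test in test_list:
--         if is_strict_child(test_name, test):
--             children.append(test)
--     return children
--
-- def is_strict_child(parent, child):
--     """Check if a test is a child of another test
--
--     Check if a test is a child of another test
--     For example with the test "TestEKSSuite/TestCPU" and the test "TestEKSSuite/TestCPU/TestCPUUtilization"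
--     this method should return True
--
--     Args:
--         parent (str): Test name to check if it is the parent
--         child (str): Test name to check if it is the child
--
--     """
--
--     splitted_parent = parent.split('/')
--     splitted_child = child.split('/')
--     if len(splitted_parent) >= len(splitted_child):
--         return False
--     for i in range(len(splitted_parent)):
--         if splitted_parent[i] != splitted_child[i]:
--             return False
--     return True
-- ===== SOURCE B (Python) =====
-- def consolidate_flaky_failures(flaky_failures: set, failing_tests: set) -> set:
--     """
--     Consolidate flaky failures via a prefix index: instead of scanning all flaky
--     failures / all failing tests for every test, look each test's own path
--     prefixes up in a hash set and precompute a prefix -> failing-descendants map.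
--     """
--     flaky_strings = set(flaky_failures)
--     flaky_keys = {tuple(f.split('/')) for f in flaky_failures}
--     desc = {}
--     for t in failing_tests:
--         parts = tuple(t.split('/'))
--         for i in range(1, len(parts)):
--             desc.setdefault(parts[:i], []).append(t)
--     result = set(flaky_failures)
--     for test in sorted(failing_tests, key=lambda x: len(x.split('/')), reverse=True):
--         if test in flaky_strings:
--             continue
--         parts = tuple(test.split('/'))
--         if any(parts[:i] in flaky_keys for i in range(1, len(parts))):
--             result.add(test)
--         children = desc.get(parts, [])
--         if children and all(c in result for c in children):
--             result.add(test)
--     return result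
-- ===== Notes on version B (the rewrite author's own statement) =====
-- stated objective: faster
-- what changed: A's two inner scans per test (over all flaky failures for an ancestor, over all failing tests for descendants) are replaced by hash lookups: each test's own path prefixes are looked up in a set of flaky keys, and a prefix->failing-descendants index built in one pass replaces the per-test descendant scan.
import Mathlib
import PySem

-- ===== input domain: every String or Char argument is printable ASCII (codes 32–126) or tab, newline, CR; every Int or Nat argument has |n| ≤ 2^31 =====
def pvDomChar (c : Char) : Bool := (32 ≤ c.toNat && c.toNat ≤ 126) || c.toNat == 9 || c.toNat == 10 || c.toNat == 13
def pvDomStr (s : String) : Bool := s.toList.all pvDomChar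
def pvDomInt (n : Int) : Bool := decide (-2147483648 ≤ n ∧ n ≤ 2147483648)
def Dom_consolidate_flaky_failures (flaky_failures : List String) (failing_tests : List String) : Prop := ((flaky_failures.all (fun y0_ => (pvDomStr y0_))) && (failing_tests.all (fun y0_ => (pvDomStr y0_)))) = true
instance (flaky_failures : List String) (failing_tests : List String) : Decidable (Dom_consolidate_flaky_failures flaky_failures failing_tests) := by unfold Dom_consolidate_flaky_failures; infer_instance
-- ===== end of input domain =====

-- B replaces A's two per-test inner scans (over all flaky failures for a flaky ancestor,
-- and over all failing tests for failing descendants) by set lookups of the test's own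
-- path prefixes and by a prefix -> failing-descendants index built once; the timing
-- run measured B faster. Both Pythons take and return sets (no mutation of inputs).

-- shared helper: s.split('/') — the separator "/" is nonempty, so split? is always `some`
def pvSplit (s : String) : List String := (PySem.Str.split? s "/").getD []

-- ===== PORT A =====
def is_strict_child (parent : String) (child : String) : Bool :=
  let splitted_parent := pvSplit parent
  let splitted_child := pvSplit child
  if splitted_parent.length ≥ splitted_child.length then false
  else (List.range splitted_parent.length).all
        (fun i => splitted_parent.getD i "" == splitted_child.getD i "")

def get_child_test_in_list (test_name : String) (test_list : List String) : List String :=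
  test_list.foldl (fun children test =>
    if is_strict_child test_name test then children ++ [test] else children) []

def consolidate_flaky_failures (flaky_failures : List String) (failing_tests : List String) : List String :=
  let new_flaky_failures : PySem.Set String := PySem.Set.ofList flaky_failures
  let list_failing_tests := PySem.List.sorted failing_tests (fun x => (pvSplit x).length) true
  list_failing_tests.foldl (fun new_flaky_failures test =>
    if flaky_failures.contains test then new_flaky_failures
    else
      -- 'for flaky_failure in flaky_failures: … add and break': add test on the first strict parent
      let nf1 := if flaky_failures.any (fun flaky_failure => is_strict_child flaky_failure test)
                 then PySem.Set.add new_flaky_failures test else new_flaky_failures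
      let children := get_child_test_in_list test failing_tests
      if children.isEmpty then nf1
      else
        let has_non_flaky_failing_child := children.any (fun child => !(nf1.contains child))
        if has_non_flaky_failing_child then nf1 else PySem.Set.add nf1 test) new_flaky_failures

-- ===== PORT B =====
-- tuple(test.split('/'))[:i] for i in range(1, len(parts)): the proper prefixes of the path
def pvKeys (t : String) : List (List String) :=
  let parts := pvSplit t
  (PySem.List.pyRange 1 parts.length).map (fun i => parts.take i.toNat)

-- desc: prefix -> failing tests having that proper prefix (setdefault(...).append(t))
def pvBuildDesc (failing_tests : List String) : PySem.Dict (List String) (List String) :=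
  failing_tests.foldl (fun d t =>
    (pvKeys t).foldl (fun d p => d.modify p [] (fun l => l ++ [t])) d) ⟨[]⟩

def consolidate_flaky_failures_alt (flaky_failures : List String) (failing_tests : List String) : List String :=
  let flaky_strings : PySem.Set String := PySem.Set.ofList flaky_failures
  let flaky_keys : PySem.Set (List String) := PySem.Set.ofList (flaky_failures.map pvSplit)
  let desc := pvBuildDesc failing_tests
  let result : PySem.Set String := PySem.Set.ofList flaky_failures
  (PySem.List.sorted failing_tests (fun x => (pvSplit x).length) true).foldl
    (fun result test =>
      if flaky_strings.contains test then result
      else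
        let r1 := if (pvKeys test).any (fun p => flaky_keys.contains p)
                  then PySem.Set.add result test else result
        let children := desc.getD (pvSplit test) []
        if !children.isEmpty && children.all (fun c => r1.contains c)
        then PySem.Set.add r1 test else r1) result

-- ===== PRECONDITION & SPEC =====
def Spec_consolidate_flaky_failures (flaky_failures : List String) (failing_tests : List String) (out : List String) : Prop := out = consolidate_flaky_failures_alt flaky_failures failing_tests
instance (flaky_failures : List String) (failing_tests : List String) (out : List String) : Decidable (Spec_consolidate_flaky_failures flaky_failures failing_tests out) := by unfold Spec_consolidate_flaky_failures; infer_instance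

-- ===== CLAIM (what is proved, stated in full; the proofs are below) =====
def Claim_equal_consolidate_flaky_failures : Prop := ∀ (flaky_failures : List String) (failing_tests : List String), Dom_consolidate_flaky_failures flaky_failures failing_tests → Spec_consolidate_flaky_failures flaky_failures failing_tests (consolidate_flaky_failures flaky_failures failing_tests)

-- ===== LEMMAS AND PROOFS =====

-- splitOn never returns the empty list (so every split has a first component)
lemma pv_go_ne_nil (fuel : Nat) : ∀ (sep l cur : List Char) (acc : List (List Char)),
    PySem.Chars.splitOn.go sep fuel l cur acc ≠ [] := by
  induction fuel with
  | zero => intro sep l cur acc; simp [PySem.Chars.splitOn.go]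
  | succ n ih =>
    intro sep l cur acc
    cases l with
    | nil => simp [PySem.Chars.splitOn.go]
    | cons c rest =>
      rw [PySem.Chars.splitOn.go]
      split
      · exact ih _ _ _ _
      · exact ih _ _ _ _

lemma pvSplit_ne_nil (s : String) : pvSplit s ≠ [] := by
  have h := pv_go_ne_nil (s.toList.length + 1) ['/'] s.toList [] []
  simp only [pvSplit, PySem.Str.split?, PySem.Chars.split?, PySem.Chars.splitOn]
  simp_all

-- A's component-by-component loop agrees on the first xs.length components iff xs is a prefix
lemma pv_all_range_getD_iff (xs ys : List String) (h : xs.length ≤ ys.length) :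
    ((List.range xs.length).all (fun i => xs.getD i "" == ys.getD i "") = true)
      ↔ xs = ys.take xs.length := by
  simp only [List.all_eq_true, List.mem_range, beq_iff_eq]
  constructor
  · intro hall
    apply List.ext_getElem
    · simp [Nat.min_eq_left h]
    · intro i h1 h2
      have := hall i h1
      rw [List.getD_eq_getElem xs "" h1, List.getD_eq_getElem ys "" (by omega)] at this
      simpa using this
  · intro heq i hi
    rw [List.getD_eq_getElem xs "" hi, List.getD_eq_getElem ys "" (by omega)]
    rw [List.getElem_of_eq heq hi]
    simp [List.getElem_take]

-- is_strict_child parent child ⟺ parent's split is one of child's proper split-prefixes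
lemma pv_isc_iff (p c : String) : is_strict_child p c = true ↔ pvSplit p ∈ pvKeys c := by
  unfold is_strict_child pvKeys
  simp only [List.mem_map, PySem.List.mem_pyRange_one]
  constructor
  · intro h
    split at h
    · simp at h
    · rename_i hge
      have hlt : (pvSplit p).length < (pvSplit c).length := by omega
      have hpos : 0 < (pvSplit p).length := List.length_pos_iff.mpr (pvSplit_ne_nil p)
      have htake := (pv_all_range_getD_iff (pvSplit p) (pvSplit c) (le_of_lt hlt)).mp h
      refine ⟨((pvSplit p).length : Int), ⟨by exact_mod_cast hpos, by exact_mod_cast hlt⟩, ?_⟩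
      simp only [Int.toNat_natCast]
      exact htake.symm
  · rintro ⟨i, ⟨h1, h2⟩, heq⟩
    have h2' : i.toNat < (pvSplit c).length := by omega
    have hlen : (pvSplit p).length = i.toNat := by
      rw [← heq, List.length_take]; omega
    have hlt : (pvSplit p).length < (pvSplit c).length := by omega
    rw [if_neg (by omega)]
    rw [pv_all_range_getD_iff _ _ (le_of_lt hlt)]
    rw [hlen, heq]

lemma pv_pyRange_one_nodup (a b : Int) : (PySem.List.pyRange a b).Nodup := by
  simp only [PySem.List.pyRange]
  rw [if_neg (by norm_num)]
  refine List.Nodup.map ?_ List.nodup_range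
  intro x y hxy
  simp only at hxy
  omega

lemma pv_pvKeys_nodup (t : String) : (pvKeys t).Nodup := by
  unfold pvKeys
  refine List.Nodup.map_on ?_ (pv_pyRange_one_nodup _ _)
  intro x hx y hy hxy
  rw [PySem.List.mem_pyRange_one] at hx hy
  have := congrArg List.length hxy
  simp only [List.length_take] at this
  omega

-- one pass of the index builder: appends t under each of its (distinct) prefix keys
lemma pv_inner_fold_getD (t : String) (ps : List (List String)) (hnd : ps.Nodup)
    (d : PySem.Dict (List String) (List String)) (k : List String) :
    ((ps.foldl (fun d p => d.modify p [] (fun l => l ++ [t])) d).getD k [])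
      = d.getD k [] ++ (if k ∈ ps then [t] else []) := by
  induction ps generalizing d with
  | nil => simp
  | cons p ps ih =>
    rw [List.nodup_cons] at hnd
    simp only [List.foldl_cons]
    rw [ih hnd.2]
    simp only [PySem.Dict.modify, PySem.Dict.getD_insert]
    by_cases hkp : k = p
    · subst hkp
      rw [if_pos rfl, if_neg hnd.1, if_pos (List.mem_cons_self)]
      simp
    · rw [if_neg hkp]
      by_cases hkps : k ∈ ps
      · rw [if_pos hkps, if_pos (List.mem_cons_of_mem _ hkps)]
      · rw [if_neg hkps, if_neg (by simp [hkp, hkps])]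

-- the whole index: desc[k] is exactly the failing tests with proper prefix k, in input order
lemma pv_buildDesc_getD (failing_tests : List String) (k : List String) :
    (pvBuildDesc failing_tests).getD k []
      = failing_tests.filter (fun t => decide (k ∈ pvKeys t)) := by
  unfold pvBuildDesc
  suffices h : ∀ (d : PySem.Dict (List String) (List String)),
      (failing_tests.foldl (fun d t => (pvKeys t).foldl (fun d p => d.modify p [] (fun l => l ++ [t])) d) d).getD k []
        = d.getD k [] ++ failing_tests.filter (fun t => decide (k ∈ pvKeys t)) by
    rw [h ⟨[]⟩]; simp [PySem.Dict.getD, PySem.Dict.get?]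
  induction failing_tests with
  | nil => simp
  | cons t ts ih =>
    intro d
    simp only [List.foldl_cons, List.filter_cons]
    rw [ih]
    rw [pv_inner_fold_getD t _ (pv_pvKeys_nodup t)]
    by_cases hk : k ∈ pvKeys t <;> simp [hk]

-- A's per-test descendant scan = B's index lookup
lemma pv_children_eq (test : String) (ft : List String) :
    get_child_test_in_list test ft = (pvBuildDesc ft).getD (pvSplit test) [] := by
  unfold get_child_test_in_list
  rw [pv_buildDesc_getD]
  have h := PySem.List.foldl_append_if (fun t => is_strict_child test t) id ft []
  simp only [id_eq, List.map_id, List.nil_append] at h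
  rw [h]
  apply List.filter_congr
  intro x _
  rw [Bool.eq_iff_iff, pv_isc_iff, decide_eq_true_iff]

lemma pv_contains_ofList (l : List String) (x : String) :
    (PySem.Set.ofList l : PySem.Set String).contains x = l.contains x := by
  rw [Bool.eq_iff_iff]
  simp only [PySem.Set.contains, List.elem_iff]
  exact PySem.Set.mem_ofList l x

-- A's per-test scan over the flaky set = B's lookups of the test's own prefixes
lemma pv_any_eq (flaky : List String) (test : String) :
    flaky.any (fun ff => is_strict_child ff test)
      = (pvKeys test).any (fun p => (PySem.Set.ofList (flaky.map pvSplit) : PySem.Set (List String)).contains p) := by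
  rw [Bool.eq_iff_iff]
  simp only [List.any_eq_true, PySem.Set.contains, List.elem_iff, PySem.Set.mem_ofList, List.mem_map]
  constructor
  · rintro ⟨ff, hff, hisc⟩
    exact ⟨pvSplit ff, (pv_isc_iff ff test).mp hisc, ff, hff, rfl⟩
  · rintro ⟨p, hp, ff, hff, hsp⟩
    exact ⟨ff, hff, (pv_isc_iff ff test).mpr (hsp ▸ hp)⟩

-- A's empty-check + non-flaky-child loop = B's nonempty-and-all-flaky condition
lemma pv_tail_eq (ch : List String) (r1 : PySem.Set String) (test : String) :
    (if ch.isEmpty then r1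
     else if ch.any (fun child => !(r1.contains child)) then r1 else PySem.Set.add r1 test)
      = (if !ch.isEmpty && ch.all (fun c => r1.contains c) then PySem.Set.add r1 test else r1) := by
  rw [show (ch.any fun child => !(r1.contains child)) = !(ch.all fun c => r1.contains c) from
    List.not_all_eq_any_not.symm]
  cases hemp : ch.isEmpty <;> cases hall : ch.all (fun c => r1.contains c) <;> simp

-- ===== VERDICT (by name: the statement is the Claim_ definition above) =====
theorem consolidate_flaky_failures_spec : Claim_equal_consolidate_flaky_failures := by
  intro flaky ft _
  unfold Spec_consolidate_flaky_failures consolidate_flaky_failures consolidate_flaky_failures_alt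
  refine PySem.List.foldl_congr_mem _ _ _ _ ?_
  intro r test _
  simp only [pv_contains_ofList, pv_any_eq, pv_children_eq]
  split
  · rfl
  · exact pv_tail_eq _ _ _
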